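-- pv_equiv track=rewrite | github.com/DA-testa/convert-array-into-heap-MiksL | build_heap.py | build_heap
-- ===== SOURCE A (Python) =====
-- def build_heap(data):
--     swaps = []
--
--     def siftDown(currentNode, nodeAmount, data):
--         minIndex = currentNode
--         leftChild = 2*currentNode + 1
--         if leftChild < nodeAmount and data[leftChild] < data[minIndex]: # Check if the left child is smaller than the current node
--             minIndex = leftChild # If it is, then set the minIndex to the left child
--
--         rightChild = 2*currentNode + 2 # Can also be written as leftChild + 1 but this is a little more readable
--         if rightChild < nodeAmount and data[rightChild] < data[minIndex]: # Check if the right child is smaller than the current node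
--             minIndex = rightChild # If it is, then set the minIndex to the right child
--
--         if currentNode != minIndex: # If the current node is not the smallest node (has been swapped to a child node), we add the swap to the swaps list
--             swaps.append((currentNode, minIndex)) # Add the swap to the swaps list
--             data[currentNode], data[minIndex] = data[minIndex], data[currentNode] # Swap the current node with the smallest node
--             siftDown(minIndex, nodeAmount, data)
--
--
--     amountOfNodes = len(data)
--     for i in range(len(data) // 2 -1, -1, -1):
--         siftDown(i, amountOfNodes, data)
--
--
--     return swaps
-- ===== SOURCE B (Python) =====
-- def build_heap(data):
--     swaps = []
--     n = len(data)
--     for i in range(n // 2 - 1, -1, -1):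
--         cur = i
--         while True:
--             m = min((c for c in (cur, 2 * cur + 1, 2 * cur + 2) if c < n),
--                     key=lambda c: data[c])
--             if m == cur:
--                 break
--             swaps.append((cur, m))
--             data[cur], data[m] = data[m], data[cur]
--             cur = m
--     return swaps
-- ===== Notes on version B (the rewrite author's own statement) =====
-- stated objective: simpler
-- what changed: Replaces A's recursive siftDown (closure-mutated swap list, two sequential child comparisons) with an iterative while-loop whose min-child choice is a single min-with-key over the in-range candidate indices; the outer heapify loop counts down without recursion.
import Mathlib
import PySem

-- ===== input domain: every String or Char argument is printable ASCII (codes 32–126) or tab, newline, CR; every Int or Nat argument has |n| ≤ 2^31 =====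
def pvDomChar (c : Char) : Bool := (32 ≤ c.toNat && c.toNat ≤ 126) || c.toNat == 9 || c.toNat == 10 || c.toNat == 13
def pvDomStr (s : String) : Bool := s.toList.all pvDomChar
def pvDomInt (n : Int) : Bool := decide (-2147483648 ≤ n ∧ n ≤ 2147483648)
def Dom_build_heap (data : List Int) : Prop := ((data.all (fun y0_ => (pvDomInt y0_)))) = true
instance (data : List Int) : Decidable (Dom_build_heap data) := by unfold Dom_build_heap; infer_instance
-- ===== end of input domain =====

-- B replaces A's recursive siftDown by an iterative loop whose min-child choice is a single
-- min-with-key over the in-range candidate indices (objective: simpler decomposition, no recursion).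
-- A mutates `data` in place in Python; the equivalence proved here is about the returned swap list
-- (both Pythons perform the identical in-place mutation).

-- ===== PORT A =====
-- Python swap: data[c], data[m] = data[m], data[c]  (indices always in range at call sites)
def pvSwapA (data : List Int) (c m : Nat) : List Int :=
  (data.set c (data.getD m 0)).set m (data.getD c 0)

-- literal port of A's recursive siftDown; `swaps` is the closure-mutated list, threaded through
def siftDownA (currentNode nodeAmount : Nat) (data : List Int)
    (swaps : List (Int × Int)) : List Int × List (Int × Int) :=
  let minIndex0 := currentNode
  let leftChild := 2 * currentNode + 1
  let minIndex1 := if leftChild < nodeAmount ∧ data.getD leftChild 0 < data.getD minIndex0 0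
    then leftChild else minIndex0
  let rightChild := 2 * currentNode + 2
  let minIndex := if rightChild < nodeAmount ∧ data.getD rightChild 0 < data.getD minIndex1 0
    then rightChild else minIndex1
  if currentNode ≠ minIndex then
    siftDownA minIndex nodeAmount (pvSwapA data currentNode minIndex)
      (swaps ++ [((currentNode : Int), (minIndex : Int))])
  else (data, swaps)
termination_by nodeAmount - currentNode
decreasing_by
  simp only [minIndex, minIndex1, minIndex0, leftChild, rightChild] at *
  split_ifs at * <;> omega

-- for i in range(len(data)//2 - 1, -1, -1): siftDown(i, amountOfNodes, data)
def build_heap (data : List Int) : List (Int × Int) :=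
  let amountOfNodes := data.length
  ((List.range (amountOfNodes / 2)).reverse.foldl
      (fun st i => siftDownA i amountOfNodes st.1 st.2) (data, [])).2

-- ===== PORT B =====
-- m = min((c for c in (cur, 2*cur+1, 2*cur+2) if c < n), key=lambda c: data[c])
-- the candidate list is nonempty at every call site (cur < n), so min() never raises
def siftLoopB (n : Nat) (xs : List Int) (acc : List (Int × Int)) (cur : Nat) :
    List Int × List (Int × Int) :=
  match h : PySem.List.min? ([cur, 2 * cur + 1, 2 * cur + 2].filter (fun c => decide (c < n)))
      (fun c => xs.getD c 0) with
  | none => (xs, acc)   -- unreachable at call sites (Python's min would raise on an empty iterable)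
  | some m =>
    if m = cur then (xs, acc)
    else siftLoopB n ((xs.set cur (xs.getD m 0)).set m (xs.getD cur 0)) (acc ++ [((cur : Int), (m : Int))]) m
termination_by n - cur
decreasing_by
  have hmem := PySem.List.min?_mem h
  simp only [List.mem_filter, List.mem_cons, decide_eq_true_eq, List.not_mem_nil, or_false] at hmem
  rcases hmem with ⟨hc | hc | hc, hlt⟩ <;> omega

def heapifyB (n : Nat) (xs : List Int) (acc : List (Int × Int)) :
    Nat → List Int × List (Int × Int)
  | 0 => (xs, acc)
  | k + 1 =>
    let st := siftLoopB n xs acc k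
    heapifyB n st.1 st.2 k

def build_heap_alt (data : List Int) : List (Int × Int) :=
  (heapifyB data.length data [] (data.length / 2)).2

-- ===== PRECONDITION & SPEC =====
def Spec_build_heap (data : List Int) (out : List (Int × Int)) : Prop := out = build_heap_alt data
instance (data : List Int) (out : List (Int × Int)) : Decidable (Spec_build_heap data out) := by unfold Spec_build_heap; infer_instance

-- ===== CLAIM (what is proved, stated in full; the proofs are below) =====
def Claim_equal_build_heap : Prop := ∀ (data : List Int), Dom_build_heap data → Spec_build_heap data (build_heap data)

-- ===== LEMMAS AND PROOFS =====

theorem minB_eq_minA (n cur : Nat) (xs : List Int) (hcur : cur < n) :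
    PySem.List.min? ([cur, 2 * cur + 1, 2 * cur + 2].filter (fun c => decide (c < n)))
      (fun c => xs.getD c 0) =
    some (if 2 * cur + 2 < n ∧ xs.getD (2 * cur + 2) 0 <
            xs.getD (if 2 * cur + 1 < n ∧ xs.getD (2 * cur + 1) 0 < xs.getD cur 0
                      then 2 * cur + 1 else cur) 0
          then 2 * cur + 2
          else if 2 * cur + 1 < n ∧ xs.getD (2 * cur + 1) 0 < xs.getD cur 0
                then 2 * cur + 1 else cur) := by
  by_cases hl : 2 * cur + 1 < n
  · by_cases hr : 2 * cur + 2 < n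
    · have hf : [cur, 2*cur+1, 2*cur+2].filter (fun c => decide (c < n)) = [cur, 2*cur+1, 2*cur+2] := by
        simp [hcur, hl, hr]
      rw [hf]
      simp only [PySem.List.min?, List.foldl_cons, List.foldl_nil, hl, hr, true_and]
      split_ifs <;> simp_all
    · have hf : [cur, 2*cur+1, 2*cur+2].filter (fun c => decide (c < n)) = [cur, 2*cur+1] := by
        simp [hcur, hl, hr]
      rw [hf]
      simp only [PySem.List.min?, List.foldl_cons, List.foldl_nil, hl, hr, true_and, false_and,
        if_false]
      split_ifs <;> simp_all
  · have hr : ¬ 2 * cur + 2 < n := by omega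
    have hf : [cur, 2*cur+1, 2*cur+2].filter (fun c => decide (c < n)) = [cur] := by
      simp [hcur, hl, hr]
    rw [hf]
    simp only [PySem.List.min?, List.foldl_cons, List.foldl_nil, hl, hr, false_and, if_false]

theorem siftLoopB_eq (n : Nat) (xs : List Int) (acc : List (Int × Int)) (cur : Nat) :
    siftLoopB n xs acc cur =
    match PySem.List.min? ([cur, 2 * cur + 1, 2 * cur + 2].filter (fun c => decide (c < n)))
        (fun c => xs.getD c 0) with
    | none => (xs, acc)
    | some m =>
      if m = cur then (xs, acc)
      else siftLoopB n ((xs.set cur (xs.getD m 0)).set m (xs.getD cur 0)) (acc ++ [((cur : Int), (m : Int))]) m := by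
  rw [siftLoopB]
  rcases hx : PySem.List.min? ([cur, 2 * cur + 1, 2 * cur + 2].filter (fun c => decide (c < n)))
      (fun c => xs.getD c 0) with _ | m <;> simp

theorem sift_eq (n : Nat) : ∀ (k cur : Nat), n - cur ≤ k → cur < n →
    ∀ (xs : List Int) (acc : List (Int × Int)),
    siftDownA cur n xs acc = siftLoopB n xs acc cur := by
  intro k
  induction k with
  | zero => intro cur hk hcur xs acc; omega
  | succ k ih =>
    intro cur hk hcur xs acc
    rw [siftDownA, siftLoopB_eq, minB_eq_minA n cur xs hcur]
    set M := (if 2 * cur + 2 < n ∧ xs.getD (2 * cur + 2) 0 <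
            xs.getD (if 2 * cur + 1 < n ∧ xs.getD (2 * cur + 1) 0 < xs.getD cur 0
                      then 2 * cur + 1 else cur) 0
          then 2 * cur + 2
          else if 2 * cur + 1 < n ∧ xs.getD (2 * cur + 1) 0 < xs.getD cur 0
                then 2 * cur + 1 else cur) with hM
    have hMrange : M = cur ∨ (cur < M ∧ M < n) := by
      rw [hM]; split_ifs <;> omega
    by_cases hm : M = cur
    · simp [hm]
    · have hlt : cur < M ∧ M < n := by tauto
      rw [if_pos (fun h => hm h.symm)]
      dsimp only
      rw [if_neg hm]
      exact ih M (by omega) hlt.2 _ _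

-- outer loop: A's fold over range(n//2-1,-1,-1) equals B's count-down recursion
theorem heap_eq (n : Nat) : ∀ (k : Nat), k ≤ n / 2 →
    ∀ (xs : List Int) (acc : List (Int × Int)),
    (List.range k).reverse.foldl (fun st i => siftDownA i n st.1 st.2) (xs, acc) =
      heapifyB n xs acc k := by
  intro k
  induction k with
  | zero => intro _ xs acc; rfl
  | succ k ih =>
    intro hk xs acc
    rw [List.range_succ, List.reverse_append]
    simp only [List.reverse_singleton, List.singleton_append, List.foldl_cons]
    rw [sift_eq n (n - k) k le_rfl (by omega) xs acc]
    rw [heapifyB]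
    have := ih (by omega) (siftLoopB n xs acc k).1 (siftLoopB n xs acc k).2
    rwa [Prod.mk.eta] at this

-- ===== VERDICT (by name: the statement is the Claim_ definition above) =====
theorem build_heap_spec : Claim_equal_build_heap := by
  intro data _
  unfold Spec_build_heap build_heap build_heap_alt
  exact congrArg Prod.snd (heap_eq data.length (data.length / 2) le_rfl data [])
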